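-- pv_equiv track=rewrite | github.com/timrozday/group-matches | group_matches/group_matches.py | get_equivalent_links
-- ===== SOURCE A (Python) =====
-- import itertools as it
--
-- def get_equivalent_links(onto_codes, equivalence_index):
--     links = set()
--     for code1,code2 in it.combinations(onto_codes,2):
--         try: groups_1 = equivalence_index[code1[0]] | {code1[0]}
--         except: continue
--
--         try: groups_2 = equivalence_index[code2[0]] | {code2[0]}
--         except: continue
--
--         if groups_1 & groups_2:
--             links.add(tuple(sorted([code1, code2])))
--
--     return links
-- ===== SOURCE B (Python) =====
-- def get_equivalent_links(onto_codes, equivalence_index):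
--     # Inverted index from group element -> indices of codes carrying it (output-sensitive:
--     # candidate partners are gathered per shared element instead of testing every pair).
--     aug = []                     # aug[i] = augmented group set of onto_codes[i], or None if its key is unindexed
--     inv = {}                     # group element -> list of indices i (increasing)
--     for i, code in enumerate(onto_codes):
--         if code[0] in equivalence_index:
--             g = equivalence_index[code[0]] | {code[0]}
--             aug.append(g)
--             for e in g:
--                 inv.setdefault(e, []).append(i)
--         else:
--             aug.append(None)
--     links = set()
--     for i, g in enumerate(aug):
--         if g is None:
--             continue
--         cands = set()
--         for e in g:
--             for j in inv[e]:
--                 if j > i: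
--                     cands.add(j)
--         c1 = onto_codes[i]
--         for j in sorted(cands):
--             c2 = onto_codes[j]
--             links.add((c1, c2) if c1 <= c2 else (c2, c1))
--     return links
-- ===== Notes on version B (the rewrite author's own statement) =====
-- stated objective: faster
-- what changed: A tests every one of the O(n^2) code pairs by rebuilding and intersecting both augmented group sets; B makes one pass that builds each code's augmented group set once plus an inverted index from group element to code indices, then gathers each code's candidate partners only from the postings of its own group elements (output-sensitive), emitting the same sorted pairs in the same order.
import Mathlib
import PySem

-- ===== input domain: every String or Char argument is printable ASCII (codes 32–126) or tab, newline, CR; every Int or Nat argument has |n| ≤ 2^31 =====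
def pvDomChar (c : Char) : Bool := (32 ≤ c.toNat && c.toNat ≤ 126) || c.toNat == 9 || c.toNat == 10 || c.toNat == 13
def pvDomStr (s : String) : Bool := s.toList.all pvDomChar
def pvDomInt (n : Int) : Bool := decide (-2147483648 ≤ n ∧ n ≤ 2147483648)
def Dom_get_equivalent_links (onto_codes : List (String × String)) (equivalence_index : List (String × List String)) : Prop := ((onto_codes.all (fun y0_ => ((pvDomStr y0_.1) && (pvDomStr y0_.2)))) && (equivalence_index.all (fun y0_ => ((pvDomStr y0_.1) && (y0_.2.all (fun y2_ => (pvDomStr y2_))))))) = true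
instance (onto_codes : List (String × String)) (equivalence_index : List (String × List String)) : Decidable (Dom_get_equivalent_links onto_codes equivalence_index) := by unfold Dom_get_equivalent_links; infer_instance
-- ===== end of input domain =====

-- B replaces A's scan of all O(n^2) pairs by an inverted index from group element to code
-- indices: candidate partners of a code are gathered only from the postings of its own group
-- elements (output-sensitive). Return value only; neither version mutates its arguments.

-- ===== PORT A =====
-- Python tuple '<' on (str, str) pairs, lexicographic (exact: Lean's String '<' is code-point order, as CPython's)
def pvPairLt (a b : String × String) : Bool :=
  decide (a.1 < b.1) || (a.1 == b.1 && decide (a.2 < b.2))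

-- tuple(sorted([code1, code2])): a stable sort of a two-element list swaps iff the second is smaller (exact)
def pvSortPair (c1 c2 : String × String) : (String × String) × (String × String) :=
  if pvPairLt c2 c1 then (c2, c1) else (c1, c2)

-- the body of A's 'for code1, code2 in it.combinations(onto_codes, 2)' loop
def pvAStep (d : PySem.Dict String (List String))
    (links : PySem.Set ((String × String) × (String × String))) (pr : List (String × String)) :
    PySem.Set ((String × String) × (String × String)) :=
  match pr with
  | [code1, code2] =>
    match d.get? code1.1 with
    | none => links                                          -- KeyError: continue
    | some v1 =>
      let groups1 := PySem.Set.union (PySem.Set.ofList v1) [code1.1]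
      match d.get? code2.1 with
      | none => links                                        -- KeyError: continue
      | some v2 =>
        let groups2 := PySem.Set.union (PySem.Set.ofList v2) [code2.1]
        if PySem.Set.inter groups1 groups2 ≠ [] then
          PySem.Set.add links (pvSortPair code1 code2)
        else links
  | _ => links                                               -- unreachable: combinations _ 2 yields 2-element lists

def get_equivalent_links (onto_codes : List (String × String)) (equivalence_index : List (String × List String)) : List ((String × String) × (String × String)) :=
  (PySem.List.combinations onto_codes 2).foldl (pvAStep (PySem.Dict.mk equivalence_index)) []

-- ===== PORT B =====
-- Python tuple '<=' on (str, str) pairs, lexicographic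
def pvPairLe (a b : String × String) : Bool :=
  decide (a.1 < b.1) || (a.1 == b.1 && decide (a.2 ≤ b.2))

-- body of B's first loop: append the augmented group set (or None) and post index i under each of its elements
def pvBStep1 (d : PySem.Dict String (List String))
    (st : List (Option (PySem.Set String)) × PySem.Dict String (List Int))
    (p : Int × (String × String)) :
    List (Option (PySem.Set String)) × PySem.Dict String (List Int) :=
  match d.get? p.2.1 with
  | some v =>
    let g := PySem.Set.union (PySem.Set.ofList v) [p.2.1]
    -- inv.setdefault(e, []).append(i)  =  inv[e] = inv.get(e, []) + [i]
    (st.1 ++ [some g], g.foldl (fun inv e => inv.modify e [] (· ++ [p.1])) st.2)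
  | none => (st.1 ++ [none], st.2)

-- cands: indices j > i sharing a group element with code i
def pvCands (inv : PySem.Dict String (List Int)) (i : Int) (g : PySem.Set String) : PySem.Set Int :=
  g.foldl (fun cands e =>
    (inv.getD e []).foldl (fun cands j => if i < j then PySem.Set.add cands j else cands) cands) []
  -- inv[e]: e ∈ g was posted for this very i, so the key is present (getD default never used)

def pvBStep2 (oc : List (String × String)) (inv : PySem.Dict String (List Int))
    (links : PySem.Set ((String × String) × (String × String)))
    (q : Int × Option (PySem.Set String)) :
    PySem.Set ((String × String) × (String × String)) :=
  match q.2 with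
  | none => links
  | some g =>
    let c1 := PySem.List.pyGetD oc q.1 ("", "")   -- onto_codes[i], 0 ≤ i < len(onto_codes): default never used
    (PySem.List.sorted (pvCands inv q.1 g) (fun x => x)).foldl
      (fun links j =>
        let c2 := PySem.List.pyGetD oc j ("", "") -- onto_codes[j], j in range by construction
        PySem.Set.add links (if pvPairLe c1 c2 then (c1, c2) else (c2, c1)))
      links

def get_equivalent_links_alt (onto_codes : List (String × String)) (equivalence_index : List (String × List String)) : List ((String × String) × (String × String)) :=
  let d := PySem.Dict.mk equivalence_index
  let st := (PySem.List.enumerate onto_codes).foldl (pvBStep1 d) ([], PySem.Dict.empty)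
  (PySem.List.enumerate st.1).foldl (pvBStep2 onto_codes st.2) []

-- ===== PRECONDITION & SPEC =====
def Spec_get_equivalent_links (onto_codes : List (String × String)) (equivalence_index : List (String × List String)) (out : List ((String × String) × (String × String))) : Prop := out = get_equivalent_links_alt onto_codes equivalence_index
instance (onto_codes : List (String × String)) (equivalence_index : List (String × List String)) (out : List ((String × String) × (String × String))) : Decidable (Spec_get_equivalent_links onto_codes equivalence_index out) := by unfold Spec_get_equivalent_links; infer_instance

-- ===== CLAIM (what is proved, stated in full; the proofs are below) =====
def Claim_equal_get_equivalent_links : Prop := ∀ (onto_codes : List (String × String)) (equivalence_index : List (String × List String)), Dom_get_equivalent_links onto_codes equivalence_index → Spec_get_equivalent_links onto_codes equivalence_index (get_equivalent_links onto_codes equivalence_index)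

-- ===== LEMMAS AND PROOFS =====

-- the augmented group set of a code, or none when its key is unindexed (shared reading of both ports)
def pvG (d : PySem.Dict String (List String)) (c : String × String) : Option (PySem.Set String) :=
  (d.get? c.1).map (fun v => PySem.Set.union (PySem.Set.ofList v) [c.1])

-- A's per-pair test: both keys indexed and the augmented groups intersect
def pvQ (d : PySem.Dict String (List String)) (c1 c2 : String × String) : Bool :=
  match pvG d c1, pvG d c2 with
  | some g1, some g2 => decide (PySem.Set.inter g1 g2 ≠ [])
  | _, _ => false

def pvH (d : PySem.Dict String (List String))
    (links : PySem.Set ((String × String) × (String × String))) (c1 c2 : String × String) :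
    PySem.Set ((String × String) × (String × String)) :=
  if pvQ d c1 c2 then PySem.Set.add links (pvSortPair c1 c2) else links

-- canonical shape of both programs: for each element, fold its tail
def pairFold {α β : Type} (h : β → α → α → β) : List α → β → β
  | [], acc => acc
  | x :: t, acc => pairFold h t (t.foldl (fun b y => h b x y) acc)

def pvMemGB (d : PySem.Dict String (List String)) (e : String) (c : String × String) : Bool :=
  match pvG d c with
  | some g => g.contains e
  | none => false

def pvINV (d : PySem.Dict String (List String)) (oc : List (String × String)) : PySem.Dict String (List Int) :=
  ((PySem.List.enumerate oc).foldl (pvBStep1 d) ([], PySem.Dict.empty)).2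

def pvJs (d : PySem.Dict String (List String)) (oc : List (String × String)) (k : Nat) (c1 : String × String) : List Int :=
  (PySem.List.pyRange (↑k + 1) ↑oc.length).filter (fun j => pvQ d c1 (PySem.List.pyGetD oc j ("", "")))

lemma pvPairLt_eq_not_le (c1 c2 : String × String) : pvPairLt c2 c1 = !pvPairLe c1 c2 := by
  rw [Bool.eq_iff_iff]
  simp only [pvPairLt, pvPairLe, Bool.or_eq_true, Bool.and_eq_true,
    decide_eq_true_eq, beq_iff_eq, Bool.not_eq_true', Bool.or_eq_false_iff, Bool.and_eq_false_iff,
    decide_eq_false_iff_not, beq_eq_false_iff_ne, ne_eq]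
  constructor
  · rintro (h | ⟨he, h⟩)
    · exact ⟨not_lt_of_gt h, Or.inl h.ne'⟩
    · exact ⟨fun h' => absurd he h'.ne', Or.inr (not_le_of_gt h)⟩
  · rintro ⟨h1, h2 | h2⟩
    · rcases lt_trichotomy c2.1 c1.1 with h | h | h
      · exact Or.inl h
      · exact absurd h.symm h2
      · exact absurd h h1
    · rcases lt_trichotomy c2.1 c1.1 with h | h | h
      · exact Or.inl h
      · exact Or.inr ⟨h, lt_of_not_ge h2⟩
      · exact absurd h h1

lemma pvSortPair_eq (c1 c2 : String × String) :
    pvSortPair c1 c2 = if pvPairLe c1 c2 then (c1, c2) else (c2, c1) := by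
  rw [pvSortPair, pvPairLt_eq_not_le]
  cases pvPairLe c1 c2 <;> rfl

lemma pvAStep_pair (d : PySem.Dict String (List String)) (acc : PySem.Set ((String × String) × (String × String))) (x y : String × String) :
    pvAStep d acc [x, y] = pvH d acc x y := by
  unfold pvAStep pvH pvQ pvG
  cases h1 : d.get? x.1 <;> cases h2 : d.get? y.1 <;> simp [h1, h2]

lemma LA (d : PySem.Dict String (List String)) (oc : List (String × String)) (acc : PySem.Set ((String × String) × (String × String))) :
    (PySem.List.combinations oc 2).foldl (pvAStep d) acc = pairFold (pvH d) oc acc := by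
  induction oc generalizing acc with
  | nil => rw [PySem.List.combinations_nil_succ]; rfl
  | cons x xs ih =>
    rw [PySem.List.combinations_cons_succ, PySem.List.combinations_one, List.foldl_append,
      List.map_map, List.foldl_map, pairFold, ← ih]
    congr 1
    exact PySem.List.foldl_congr_mem _ _ _ _ (fun a y _ => pvAStep_pair d a x y)

lemma L1 (d : PySem.Dict String (List String)) (l : List (Int × (String × String)))
    (st : List (Option (PySem.Set String)) × PySem.Dict String (List Int)) :
    (l.foldl (pvBStep1 d) st).1 = st.1 ++ l.map (fun p => pvG d p.2) := by
  induction l generalizing st with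
  | nil => simp
  | cons p t ih =>
    rw [List.foldl_cons, List.map_cons, ih]
    unfold pvBStep1 pvG
    cases h : d.get? p.2.1 <;> simp

lemma L2a (g : List String) (hg : g.Nodup) (inv : PySem.Dict String (List Int)) (i : Int) (e : String) :
    (g.foldl (fun inv e' => inv.modify e' [] (· ++ [i])) inv).getD e []
      = inv.getD e [] ++ if e ∈ g then [i] else [] := by
  have h1 : g.foldl (fun inv e' => inv.modify e' [] (· ++ [i])) inv
      = (g.map (fun e' => (e', i))).foldl (fun d p => d.modify p.1 [] (fun x => x ++ [p.2])) inv := by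
    rw [List.foldl_map]
  rw [h1, PySem.Dict.getD_foldl_modify_append, List.filter_map]
  congr 1
  have h2 : (fun (p : String × Int) => p.1 == e) ∘ (fun e' => (e', i)) = (fun x => x == e) := rfl
  rw [h2, List.map_map, List.filter_beq]
  by_cases he : e ∈ g
  · rw [List.count_eq_one_of_mem hg he, if_pos he]; rfl
  · rw [List.count_eq_zero_of_not_mem he, if_neg he]; rfl

lemma L2 (d : PySem.Dict String (List String)) (l : List (Int × (String × String)))
    (st : List (Option (PySem.Set String)) × PySem.Dict String (List Int)) (e : String) :
    (l.foldl (pvBStep1 d) st).2.getD e []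
      = st.2.getD e [] ++ (l.filter (fun p => pvMemGB d e p.2)).map (·.1) := by
  induction l generalizing st with
  | nil => simp
  | cons p t ih =>
    rw [List.foldl_cons, ih]
    cases h : d.get? p.2.1 with
    | none =>
      have hm : pvMemGB d e p.2 = false := by simp [pvMemGB, pvG, h]
      simp [pvBStep1, h, hm]
    | some v =>
      have hnd : (PySem.Set.union (PySem.Set.ofList v) [p.2.1]).Nodup :=
        PySem.Set.nodup_union _ _ (PySem.Set.nodup_ofList v)
      have hstep : (pvBStep1 d st p).2
          = (PySem.Set.union (PySem.Set.ofList v) [p.2.1]).foldl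
              (fun inv e' => inv.modify e' [] (· ++ [p.1])) st.2 := by
        simp [pvBStep1, h]
      rw [hstep, L2a _ hnd]
      have hm : pvMemGB d e p.2 = (PySem.Set.union (PySem.Set.ofList v) [p.2.1]).contains e := by
        simp [pvMemGB, pvG, h]
      by_cases he : e ∈ PySem.Set.union (PySem.Set.ofList v) [p.2.1]
      · have hmt : pvMemGB d e p.2 = true := by
          rw [hm]; exact (PySem.Set.contains_iff _ _).mpr he
        simp [he, hmt]
      · have hmf : pvMemGB d e p.2 = false := by
          rw [hm, Bool.eq_false_iff]
          exact fun hc => he ((PySem.Set.contains_iff _ _).mp hc)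
        simp [he, hmf]

lemma L4 (d : PySem.Dict String (List String)) (oc : List (String × String)) (e : String) (j : Int) :
    j ∈ (pvINV d oc).getD e [] ↔ ∃ (m : Nat) (_ : m < oc.length), j = (m : Int) ∧ pvMemGB d e oc[m] := by
  unfold pvINV
  rw [L2, PySem.Dict.getD_empty, List.nil_append]
  simp only [List.mem_map, List.mem_filter, PySem.List.mem_enumerate_iff]
  constructor
  · rintro ⟨p, ⟨⟨m, hm, rfl⟩, hq⟩, rfl⟩
    exact ⟨m, hm, by simp, by simpa using hq⟩
  · rintro ⟨m, hm, rfl, hq⟩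
    exact ⟨((m : Int), oc[m]), ⟨⟨m, hm, by simp⟩, hq⟩, rfl⟩

lemma L3a (i : Int) (l : List Int) (s : PySem.Set Int) (x : Int) :
    x ∈ l.foldl (fun s j => if i < j then PySem.Set.add s j else s) s ↔ x ∈ s ∨ (x ∈ l ∧ i < x) := by
  induction l generalizing s with
  | nil => simp
  | cons j t ih =>
    rw [List.foldl_cons, ih]
    by_cases h : i < j
    · simp only [if_pos h, PySem.Set.mem_add, List.mem_cons]
      constructor
      · rintro ((hx | rfl) | hx)
        · exact Or.inl hx
        · exact Or.inr ⟨Or.inl rfl, h⟩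
        · exact Or.inr ⟨Or.inr hx.1, hx.2⟩
      · rintro (hx | ⟨rfl | hx, hix⟩)
        · exact Or.inl (Or.inl hx)
        · exact Or.inl (Or.inr rfl)
        · exact Or.inr ⟨hx, hix⟩
    · simp only [if_neg h, List.mem_cons]
      constructor
      · rintro (hx | hx)
        · exact Or.inl hx
        · exact Or.inr ⟨Or.inr hx.1, hx.2⟩
      · rintro (hx | ⟨rfl | hx, hix⟩)
        · exact Or.inl hx
        · exact absurd hix h
        · exact Or.inr ⟨hx, hix⟩

lemma L3an (i : Int) (l : List Int) (s : PySem.Set Int) (hs : s.Nodup) :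
    (l.foldl (fun s j => if i < j then PySem.Set.add s j else s) s).Nodup := by
  induction l generalizing s with
  | nil => exact hs
  | cons j t ih =>
    rw [List.foldl_cons]
    by_cases h : i < j
    · rw [if_pos h]; exact ih _ (PySem.Set.nodup_add s j hs)
    · rw [if_neg h]; exact ih _ hs

lemma L3 (inv : PySem.Dict String (List Int)) (i : Int) (g : PySem.Set String) (x : Int) :
    x ∈ pvCands inv i g ↔ ∃ e ∈ g, x ∈ inv.getD e [] ∧ i < x := by
  unfold pvCands
  have key : ∀ (l : List String) (s : PySem.Set Int),
      x ∈ l.foldl (fun cands e =>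
        (inv.getD e []).foldl (fun cands j => if i < j then PySem.Set.add cands j else cands) cands) s
        ↔ x ∈ s ∨ ∃ e ∈ l, x ∈ inv.getD e [] ∧ i < x := by
    intro l
    induction l with
    | nil => simp
    | cons e t ih =>
      intro s
      rw [List.foldl_cons, ih, L3a]
      constructor
      · rintro ((hx | ⟨hx, hix⟩) | ⟨e', he', hx⟩)
        · exact Or.inl hx
        · exact Or.inr ⟨e, List.mem_cons_self, hx, hix⟩
        · exact Or.inr ⟨e', List.mem_cons_of_mem _ he', hx⟩
      · rintro (hx | ⟨e', he', hx⟩)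
        · exact Or.inl (Or.inl hx)
        · rcases List.mem_cons.mp he' with rfl | he'
          · exact Or.inl (Or.inr hx)
          · exact Or.inr ⟨e', he', hx⟩
  simp [key]

lemma pvCands_fold_nodup (inv : PySem.Dict String (List Int)) (i : Int) (l : List String)
    (s : PySem.Set Int) (hs : s.Nodup) :
    (l.foldl (fun cands e =>
      (inv.getD e []).foldl (fun cands j => if i < j then PySem.Set.add cands j else cands) cands) s).Nodup := by
  induction l generalizing s with
  | nil => exact hs
  | cons e t ih => exact ih _ (L3an i _ s hs)

lemma L3n (inv : PySem.Dict String (List Int)) (i : Int) (g : PySem.Set String) :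
    (pvCands inv i g).Nodup := by
  exact pvCands_fold_nodup inv i g [] List.nodup_nil

lemma LQ (d : PySem.Dict String (List String)) (c1 c2 : String × String) (g : PySem.Set String)
    (hg : pvG d c1 = some g) :
    pvQ d c1 c2 = true ↔ ∃ e, e ∈ g ∧ pvMemGB d e c2 = true := by
  unfold pvQ pvMemGB
  rw [hg]
  cases h2 : pvG d c2 with
  | none => simp
  | some g2 =>
    simp only [decide_eq_true_eq]
    constructor
    · intro hne
      rcases List.exists_mem_of_ne_nil _ hne with ⟨x, hx⟩
      rcases (PySem.Set.mem_inter g g2 x).mp hx with ⟨hxg, hxg2⟩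
      exact ⟨x, hxg, (PySem.Set.contains_iff _ _).mpr hxg2⟩
    · rintro ⟨x, hxg, hc⟩ hnil
      have hxg2 := (PySem.Set.contains_iff _ _).mp hc
      have : x ∈ PySem.Set.inter g g2 := (PySem.Set.mem_inter g g2 x).mpr ⟨hxg, hxg2⟩
      rw [hnil] at this
      exact absurd this (List.not_mem_nil)

lemma L5 (d : PySem.Dict String (List String)) (oc : List (String × String)) (k : Nat) (g : PySem.Set String)
    (hk : k < oc.length) (hg : pvG d oc[k] = some g) :
    PySem.List.sorted (pvCands (pvINV d oc) ↑k g) (fun x => x) = pvJs d oc k oc[k] := by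
  apply PySem.List.sorted_eq_of_perm_of_pairwise_lt
  · have hjnd : (pvJs d oc k oc[k]).Nodup := (PySem.List.nodup_pyRange_one _ _).filter _
    rw [List.perm_ext_iff_of_nodup hjnd (L3n _ _ _)]
    intro x
    unfold pvJs
    simp only [List.mem_filter, PySem.List.mem_pyRange_one]
    constructor
    · rintro ⟨⟨hlo, hhi⟩, hq⟩
      have hm : x.toNat < oc.length := by omega
      have hx : x = (x.toNat : Int) := by omega
      rw [PySem.List.pyGetD_eq_getElem oc _ (by omega) (by omega)] at hq
      rcases (LQ d oc[k] oc[x.toNat] g hg).mp hq with ⟨e, heg, hmem⟩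
      exact (L3 _ _ _ _).mpr ⟨e, heg, (L4 d oc e x).mpr ⟨x.toNat, hm, hx, hmem⟩, by omega⟩
    · intro hx
      rcases (L3 _ _ _ _).mp hx with ⟨e, heg, hinv, hlt⟩
      rcases (L4 d oc e x).mp hinv with ⟨m, hm, rfl, hmem⟩
      have hkm : k < m := by exact_mod_cast hlt
      refine ⟨⟨by omega, by exact_mod_cast hm⟩, ?_⟩
      rw [PySem.List.pyGetD_eq_getElem oc _ (by omega) (by exact_mod_cast hm)]
      have hmt : ((m : Int)).toNat = m := by omega
      rw [show oc[((m : Int)).toNat]'(by omega) = oc[m]'hm from by congr 1]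
      exact (LQ d oc[k] oc[m] g hg).mpr ⟨e, heg, hmem⟩
  · exact (PySem.List.pairwise_lt_pyRange_one _ _).filter _

lemma LDrop (oc : List (String × String)) (dflt : String × String) (k : Nat) :
    (PySem.List.pyRange ↑k ↑oc.length).map (fun j => PySem.List.pyGetD oc j dflt) = oc.drop k := by
  apply List.ext_getElem
  · simp only [List.length_map, PySem.List.length_pyRange_one, List.length_drop]
    omega
  · intro t h1 h2
    simp only [List.getElem_map, PySem.List.getElem_pyRange_one, List.getElem_drop]
    have h1' : t < ((oc.length : Int) - ↑k).toNat := by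
      simpa [PySem.List.length_pyRange_one] using h1
    rw [PySem.List.pyGetD_eq_getElem oc dflt (by omega) (by omega)]
    congr 1

lemma L6 (d : PySem.Dict String (List String)) (oc : List (String × String)) (k : Nat)
    (c1 : String × String) (rest : List (String × String))
    (hk : oc.drop k = c1 :: rest) (links : PySem.Set ((String × String) × (String × String))) :
    (pvJs d oc k c1).foldl
      (fun links j =>
        PySem.Set.add links (if pvPairLe c1 (PySem.List.pyGetD oc j ("", "")) then (c1, PySem.List.pyGetD oc j ("", "")) else (PySem.List.pyGetD oc j ("", ""), c1)))
      links
      = rest.foldl (fun b y => pvH d b c1 y) links := by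
  have hk' : k < oc.length := by
    by_contra hge
    rw [List.drop_eq_nil_of_le (le_of_not_gt hge)] at hk
    exact absurd hk.symm (List.cons_ne_nil _ _)
  have hcons := List.drop_eq_getElem_cons hk'
  rw [hk] at hcons
  injection hcons with hc hrest
  unfold pvJs
  rw [List.foldl_map (f := fun j => PySem.List.pyGetD oc j ("", ""))
    (g := fun links c2 => PySem.Set.add links (if pvPairLe c1 c2 then (c1, c2) else (c2, c1))) |>.symm]
  have hq : (fun j => pvQ d c1 (PySem.List.pyGetD oc j ("", "")))
      = ((fun c2 => pvQ d c1 c2) ∘ (fun j => PySem.List.pyGetD oc j ("", ""))) := rfl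
  rw [hq, ← List.filter_map]
  have hcast : ((k : Int) + 1) = ((k + 1 : Nat) : Int) := by norm_num
  rw [hcast, LDrop oc ("", "") (k + 1), ← hrest]
  have hR : rest.foldl (fun b y => pvH d b c1 y) links
      = (rest.filter (fun y => pvQ d c1 y)).foldl (fun b y => PySem.Set.add b (pvSortPair c1 y)) links := by
    unfold pvH
    exact PySem.List.foldl_if_eq_foldl_filter _ _ _ _
  rw [hR]
  exact PySem.List.foldl_congr_mem _ _ _ _ (fun acc y _ => by rw [pvSortPair_eq])

lemma L7 (d : PySem.Dict String (List String)) (oc : List (String × String)) (rest : List (String × String)) (k : Nat)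
    (hk : oc.drop k = rest) (acc : PySem.Set ((String × String) × (String × String))) :
    (PySem.List.enumerate (rest.map (pvG d)) ↑k).foldl (pvBStep2 oc (pvINV d oc)) acc
      = pairFold (pvH d) rest acc := by
  induction rest generalizing k acc with
  | nil => rfl
  | cons c rest' ih =>
    have hk' : k < oc.length := by
      by_contra hge
      rw [List.drop_eq_nil_of_le (le_of_not_gt hge)] at hk
      exact absurd hk.symm (List.cons_ne_nil _ _)
    have hcons := List.drop_eq_getElem_cons hk'
    rw [hk] at hcons
    injection hcons with hc hrest
    rw [List.map_cons, PySem.List.enumerate_cons, List.foldl_cons]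
    have hstep : pvBStep2 oc (pvINV d oc) acc ((k : Int), pvG d c)
        = rest'.foldl (fun b y => pvH d b c y) acc := by
      cases hg : pvG d c with
      | none =>
        have hid : ∀ (b : PySem.Set ((String × String) × (String × String))) (y : String × String),
            pvH d b c y = b := by
          intro b y
          unfold pvH pvQ
          rw [hg]
          cases pvG d y <;> simp
        rw [PySem.List.foldl_congr_mem rest' (fun b y => pvH d b c y) (fun b _ => b) acc
          (fun acc x _ => hid acc x), PySem.List.foldl_ignore]
        simp [pvBStep2]
      | some g =>
        have hc1 : PySem.List.pyGetD oc (↑k) ("", "") = c := by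
          rw [PySem.List.pyGetD_eq_getElem oc _ (by omega) (by exact_mod_cast hk')]
          rw [hc]
          simp
        simp only [pvBStep2]
        rw [hc1, L5 d oc k g hk' (by rw [← hc]; exact hg), ← hc]
        exact L6 d oc k c rest' hk acc
    rw [hstep]
    have hcast : ((k : Int) + 1) = ((k + 1 : Nat) : Int) := by norm_num
    rw [hcast, ih (k + 1) hrest.symm]
    conv_rhs => rw [pairFold]

lemma LB (oc : List (String × String)) (ei : List (String × List String)) :
    get_equivalent_links_alt oc ei = pairFold (pvH (PySem.Dict.mk ei)) oc [] := by
  unfold get_equivalent_links_alt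
  show (PySem.List.enumerate ((PySem.List.enumerate oc).foldl (pvBStep1 (PySem.Dict.mk ei)) ([], PySem.Dict.empty)).1).foldl
      (pvBStep2 oc ((PySem.List.enumerate oc).foldl (pvBStep1 (PySem.Dict.mk ei)) ([], PySem.Dict.empty)).2) []
    = pairFold (pvH (PySem.Dict.mk ei)) oc []
  have h1 : ((PySem.List.enumerate oc).foldl (pvBStep1 (PySem.Dict.mk ei)) ([], PySem.Dict.empty)).1
      = oc.map (pvG (PySem.Dict.mk ei)) := by
    rw [L1, List.nil_append]
    have h2 : (PySem.List.enumerate oc).map (fun p => pvG (PySem.Dict.mk ei) p.2)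
        = ((PySem.List.enumerate oc).map (·.2)).map (pvG (PySem.Dict.mk ei)) := by
      rw [List.map_map]; rfl
    rw [h2, PySem.List.map_snd_enumerate]
  have h3 : ((PySem.List.enumerate oc).foldl (pvBStep1 (PySem.Dict.mk ei)) ([], PySem.Dict.empty)).2
      = pvINV (PySem.Dict.mk ei) oc := rfl
  rw [h1, h3]
  have h4 : (0 : Int) = ((0 : Nat) : Int) := rfl
  rw [h4]
  exact L7 (PySem.Dict.mk ei) oc oc 0 List.drop_zero []

-- ===== VERDICT (by name: the statement is the Claim_ definition above) =====
theorem get_equivalent_links_spec : Claim_equal_get_equivalent_links := by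
  intro oc ei _
  show get_equivalent_links oc ei = get_equivalent_links_alt oc ei
  rw [LB, get_equivalent_links, LA]
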